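-- pv_equiv track=rewrite | github.com/jmistx/TwentyOnePrice | spread.py | check
-- ===== SOURCE A (Python) =====
-- def spread(n, k, i):
--     return (n // k) + (1 if i < (n % k) else 0)
--
-- def check(n, k):
--     buckets = [ spread(n,k,i) for i in range(k)]
--     print ( buckets )
--     buckets_sum = sum(buckets)
--     print ( buckets_sum == n)
--     if buckets_sum != n:
--         raise Exception(n)
--     return buckets_sum
-- ===== SOURCE B (Python) =====
-- def check(n, k):
--     if k <= 0:
--         buckets = []
--     else:
--         q, r = divmod(n, k)
--         buckets = [q + 1] * r + [q] * (k - r)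
--     print(buckets)
--     buckets_sum = sum(buckets)
--     print(buckets_sum == n)
--     if buckets_sum != n:
--         raise Exception(n)
--     return buckets_sum
-- ===== Notes on version B (the rewrite author's own statement) =====
-- stated objective: faster
-- what changed: B replaces A's per-index comprehension calling spread (a division and a modulo per bucket) with one divmod and closed-form list replication [q+1]*r + [q]*(k-r).
import Mathlib
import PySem

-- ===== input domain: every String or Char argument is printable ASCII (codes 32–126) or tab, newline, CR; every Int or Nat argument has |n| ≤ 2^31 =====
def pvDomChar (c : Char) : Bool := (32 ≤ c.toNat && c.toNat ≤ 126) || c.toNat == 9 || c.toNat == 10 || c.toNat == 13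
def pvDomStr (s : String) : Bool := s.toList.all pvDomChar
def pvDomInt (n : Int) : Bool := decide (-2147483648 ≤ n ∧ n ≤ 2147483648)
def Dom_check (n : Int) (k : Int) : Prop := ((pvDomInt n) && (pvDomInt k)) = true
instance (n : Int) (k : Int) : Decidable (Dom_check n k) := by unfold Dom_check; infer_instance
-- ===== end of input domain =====

-- B builds the buckets by one divmod and closed-form replication [q+1]*r + [q]*(k-r) instead of a division and modulo per index; equivalence is about the RETURN value (both programs also print).


-- ===== PORT A =====
def spread (n : Int) (k : Int) (i : Int) : Int :=
  PySem.Int.floordiv n k + (if i < PySem.Int.mod n k then 1 else 0)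

def check (n : Int) (k : Int) : Int :=
  let buckets := (PySem.List.pyRange 0 k 1).map (fun i => spread n k i)
  let buckets_sum := buckets.foldl (· + ·) 0
  buckets_sum

-- ===== PORT B =====
def check_alt (n : Int) (k : Int) : Int :=
  let buckets :=
    if k ≤ 0 then ([] : List Int)
    else
      let q := PySem.Int.floordiv n k
      let r := PySem.Int.mod n k
      List.replicate r.toNat (q + 1) ++ List.replicate (k - r).toNat q
  let buckets_sum := buckets.foldl (· + ·) 0
  buckets_sum

-- ===== PRECONDITION & SPEC =====
-- Pre_ excludes k ≤ 0 with n ≠ 0: there range(k) is empty, the bucket sum is 0 ≠ n, and A raises Exception(n) (B raises identically).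
def Pre_check (n : Int) (k : Int) : Prop := 0 < k ∨ n = 0
instance (n : Int) (k : Int) : Decidable (Pre_check n k) := by unfold Pre_check; infer_instance
def pvWitness_check : Int × Int := (7, 3)
def Spec_check (n : Int) (k : Int) (out : Int) : Prop := out = check_alt n k
instance (n : Int) (k : Int) (out : Int) : Decidable (Spec_check n k out) := by unfold Spec_check; infer_instance

-- ===== CLAIM (what is proved, stated in full; the proofs are below) =====
def Claim_equal_check : Prop := ∀ (n : Int) (k : Int), Dom_check n k → Pre_check n k → Spec_check n k (check n k)

-- ===== LEMMAS AND PROOFS =====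

-- Python's sum is a left fold; relate it to List.sum for the arithmetic below.
lemma foldl_add_eq_sum (l : List Int) : l.foldl (· + ·) 0 = l.sum := by
  rw [List.sum_eq_foldl]

-- A's bucket sum is n whenever 0 < k: split range(k) at r = n % k.
lemma check_sum (n k : Int) (hk : 0 < k) : check n k = n := by
  have hr0 : 0 ≤ PySem.Int.mod n k := PySem.Int.mod_nonneg n hk
  have hrk : PySem.Int.mod n k < k := PySem.Int.mod_lt n hk
  set q := PySem.Int.floordiv n k with hq
  set r := PySem.Int.mod n k with hrdef
  have hsplit := PySem.List.pyRange_one_append 0 r k hr0 (le_of_lt hrk)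
  have hqr : q * k + r = n := PySem.Int.floordiv_mul_add_mod n k
  simp only [check, spread, hsplit]
  rw [foldl_add_eq_sum]
  simp only [List.map_append, List.sum_append]
  have h1 : (PySem.List.pyRange 0 r 1).map (fun i => q + if i < r then 1 else 0)
      = (PySem.List.pyRange 0 r 1).map (fun _ => q + 1) := by
    apply List.map_congr_left
    intro i hi
    rw [PySem.List.mem_pyRange_one] at hi
    simp [hi.2]
  have h2 : (PySem.List.pyRange r k 1).map (fun i => q + if i < r then 1 else 0)
      = (PySem.List.pyRange r k 1).map (fun _ => q) := by
    apply List.map_congr_left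
    intro i hi
    rw [PySem.List.mem_pyRange_one] at hi
    simp [not_lt.mpr hi.1]
  rw [h1, h2, PySem.List.sum_map_const_int, PySem.List.sum_map_const_int,
    PySem.List.length_pyRange_one, PySem.List.length_pyRange_one]
  have e1 : ((r - 0).toNat : Int) = r := by omega
  have e2 : (((k - r)).toNat : Int) = k - r := by omega
  rw [e1, e2]
  linear_combination hqr

-- B's bucket sum is n whenever 0 < k.
lemma check_alt_sum (n k : Int) (hk : 0 < k) : check_alt n k = n := by
  have hr0 : 0 ≤ PySem.Int.mod n k := PySem.Int.mod_nonneg n hk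
  have hrk : PySem.Int.mod n k < k := PySem.Int.mod_lt n hk
  set q := PySem.Int.floordiv n k with hq
  set r := PySem.Int.mod n k with hrdef
  have hqr : q * k + r = n := PySem.Int.floordiv_mul_add_mod n k
  simp only [check_alt, if_neg (not_le.mpr hk)]
  rw [foldl_add_eq_sum]
  simp only [List.sum_append, List.sum_replicate, nsmul_eq_mul]
  have e1 : ((r.toNat) : Int) = r := by omega
  have e2 : (((k - r).toNat) : Int) = k - r := by omega
  rw [e1, e2]
  linear_combination hqr

-- ===== VERDICT (by name: the statement is the Claim_ definition above) =====
theorem check_spec : Claim_equal_check := by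
  intro n k _ hpre
  unfold Spec_check
  by_cases hk : 0 < k
  · rw [check_sum n k hk, check_alt_sum n k hk]
  · have hk' : k ≤ 0 := not_lt.mp hk
    simp [check, check_alt, PySem.List.pyRange_one_eq_nil hk', if_pos hk']
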